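-- pv_equiv track=rewrite | github.com/pierre-chaville/automlk | automlk/controller.py | __get_round_ids
-- ===== SOURCE A (Python) =====
-- ROUND_START_ENSEMBLE = 200  # number of rounds to start ensembles
--
-- RATIO_L1_L2 = 2  # number of L1 rounds compared to L2 rounds
--
-- def __get_round_ids(round_id):
--     # find round ids for each level; return = level, round_id_l1, round_id_l2
--
--     if round_id < ROUND_START_ENSEMBLE:
--         return 1, round_id, -1
--     round_id_l1 = -1
--     round_id_l2 = -1
--     for i in range(round_id + 1):
--         if i >= ROUND_START_ENSEMBLE and i % RATIO_L1_L2 == 0: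
--             round_id_l2 += 1
--         else:
--             round_id_l1 += 1
--     if round_id >= ROUND_START_ENSEMBLE and round_id % RATIO_L1_L2 == 0:
--         return 2, round_id_l1, round_id_l2
--     else:
--         return 1, round_id_l1, round_id_l2
-- ===== SOURCE B (Python) =====
-- ROUND_START_ENSEMBLE = 200  # number of rounds to start ensembles
--
-- RATIO_L1_L2 = 2  # number of L1 rounds compared to L2 rounds
--
-- def __get_round_ids(round_id):
--     # closed-form: count of L2 rounds (even i in [200, round_id]) computed arithmetically, O(1)
--     if round_id < ROUND_START_ENSEMBLE:
--         return 1, round_id, -1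
--     n_l2 = round_id // RATIO_L1_L2 - ROUND_START_ENSEMBLE // RATIO_L1_L2 + 1
--     level = 2 if round_id % RATIO_L1_L2 == 0 else 1
--     return level, round_id - n_l2, n_l2 - 1
-- ===== Notes on version B (the rewrite author's own statement) =====
-- stated objective: faster
-- what changed: Replaced the O(n) loop counting even rounds above the ensemble threshold with a closed-form floor-division formula, making the function O(1).
import Mathlib
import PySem

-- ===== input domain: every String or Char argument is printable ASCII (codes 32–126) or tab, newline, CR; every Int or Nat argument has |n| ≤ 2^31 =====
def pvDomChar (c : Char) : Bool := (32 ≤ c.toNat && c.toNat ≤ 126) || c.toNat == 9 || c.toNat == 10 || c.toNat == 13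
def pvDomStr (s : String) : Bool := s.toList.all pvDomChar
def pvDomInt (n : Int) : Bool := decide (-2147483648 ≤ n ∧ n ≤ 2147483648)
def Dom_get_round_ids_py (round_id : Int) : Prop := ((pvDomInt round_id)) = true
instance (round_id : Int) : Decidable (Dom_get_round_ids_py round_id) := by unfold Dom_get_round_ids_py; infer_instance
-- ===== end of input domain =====

-- B replaces A's O(n) counting loop by a closed-form floor-division formula (O(1)).

-- ===== PORT A =====
-- the loop body of A: accumulate (round_id_l1, round_id_l2)
def pvStepA (p : Int × Int) (i : Int) : Int × Int :=
  if 200 ≤ i ∧ PySem.Int.mod i 2 = 0 then (p.1, p.2 + 1) else (p.1 + 1, p.2)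

def get_round_ids_py (round_id : Int) : Int × Int × Int :=
  if round_id < 200 then (1, round_id, -1)
  else
    let p := (PySem.List.pyRange 0 (round_id + 1) 1).foldl pvStepA (-1, -1)
    if 200 ≤ round_id ∧ PySem.Int.mod round_id 2 = 0 then (2, p.1, p.2)
    else (1, p.1, p.2)

-- ===== PORT B =====
def get_round_ids_py_alt (round_id : Int) : Int × Int × Int :=
  if round_id < 200 then (1, round_id, -1)
  else
    let n_l2 := PySem.Int.floordiv round_id 2 - PySem.Int.floordiv 200 2 + 1
    let level : Int := if PySem.Int.mod round_id 2 = 0 then 2 else 1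
    (level, round_id - n_l2, n_l2 - 1)

-- ===== PRECONDITION & SPEC =====
def Spec_get_round_ids_py (round_id : Int) (out : Int × Int × Int) : Prop := out = get_round_ids_py_alt round_id
instance (round_id : Int) (out : Int × Int × Int) : Decidable (Spec_get_round_ids_py round_id out) := by unfold Spec_get_round_ids_py; infer_instance

-- ===== CLAIM (what is proved, stated in full; the proofs are below) =====
def Claim_equal_get_round_ids_py : Prop := ∀ (round_id : Int), Dom_get_round_ids_py round_id → Spec_get_round_ids_py round_id (get_round_ids_py round_id)

-- ===== LEMMAS AND PROOFS =====

-- closed form of A's loop for round_id = 200 + n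
set_option maxRecDepth 8192 in
lemma pvLoopA_eq (n : Nat) :
    (PySem.List.pyRange 0 ((200 + (n : Int)) + 1) 1).foldl pvStepA (-1, -1) =
      ((200 + (n : Int)) - ((200 + (n : Int)) / 2 - 99), (200 + (n : Int)) / 2 - 100) := by
  induction n with
  | zero => decide
  | succ m ih =>
    have hcast : (((m + 1 : Nat)) : Int) = (m : Int) + 1 := by push_cast; ring
    rw [hcast]
    have he : (200 + ((m : Int) + 1)) + 1 = ((200 + (m : Int)) + 1) + 1 := by ring
    rw [he, PySem.List.pyRange_one_succ_right
          (show (0 : Int) ≤ 200 + (m : Int) + 1 by positivity), List.foldl_append]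
    have hm : PySem.Int.mod (200 + (m : Int) + 1) 2 = (200 + (m : Int) + 1) % 2 :=
      PySem.Int.mod_eq_emod_of_pos (by norm_num)
    simp only [List.foldl, ih, pvStepA, hm]
    split_ifs with hc
    · obtain ⟨-, h2⟩ := hc
      refine Prod.ext ?_ ?_ <;> simp <;> omega
    · rw [not_and_or] at hc
      rcases hc with hc | hc
      · omega
      · refine Prod.ext ?_ ?_ <;> simp <;> omega

-- ===== VERDICT (by name: the statement is the Claim_ definition above) =====
theorem get_round_ids_py_spec : Claim_equal_get_round_ids_py := by
  intro round_id _
  unfold Spec_get_round_ids_py get_round_ids_py get_round_ids_py_alt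
  by_cases hlt : round_id < 200
  · simp [hlt]
  · simp only [hlt, if_false]
    have h200 : (200 : Int) ≤ round_id := by omega
    obtain ⟨n, hn⟩ : ∃ n : Nat, round_id = 200 + (n : Int) :=
      ⟨(round_id - 200).toNat, by omega⟩
    subst hn
    rw [pvLoopA_eq]
    have hfd : PySem.Int.floordiv (200 + (n : Int)) 2 = (200 + (n : Int)) / 2 :=
      PySem.Int.floordiv_eq_ediv_of_pos (by norm_num)
    have hfd200 : PySem.Int.floordiv 200 2 = 100 := by decide
    have hmod : PySem.Int.mod (200 + (n : Int)) 2 = (200 + (n : Int)) % 2 :=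
      PySem.Int.mod_eq_emod_of_pos (by norm_num)
    simp only [hfd, hfd200, hmod]
    split_ifs with h1 h2 h2
    · refine Prod.ext rfl (Prod.ext ?_ ?_) <;> simp <;> omega
    · exact absurd h1.2 h2
    · exact absurd ⟨h200, h2⟩ h1
    · refine Prod.ext rfl (Prod.ext ?_ ?_) <;> simp <;> omega
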